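-- pv_equiv track=rewrite | github.com/ReChat-2025/ResXiv_V2 | backend/resxiv_backend/app/services/research_aggregator_service.py | _merge_author_profiles
-- ===== SOURCE A (Python) =====
-- from typing import Dict, Any, List, Optional, Union, Tuple
--
-- def _merge_author_profiles(all_author_data: Dict[str, Any]) -> Dict[str, Any]:
--     """Merge author profiles from different sources"""
--     merged_profile = {}
--
--     for source, data in all_author_data.items():
--         author = data.get('author', {})
--         for key, value in author.items():
--             if value and (key not in merged_profile or not merged_profile[key]):
--                 merged_profile[key] = value
--
--     return merged_profile
-- ===== SOURCE B (Python) =====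
-- def _merge_author_profiles(all_author_data):
--     """Merge author profiles from different sources"""
--     index = {}
--     for data in all_author_data.values():
--         for key, value in data.get('author', {}).items():
--             if value:
--                 index.setdefault(key, []).append(value)
--     return {key: values[0] for key, values in index.items()}
-- ===== Notes on version B (the rewrite author's own statement) =====
-- stated objective: alternative
-- what changed: Replaces the streaming first-non-empty-wins conditional-update dict with a two-phase gather-then-select decomposition: first group every truthy value per key into lists (setdefault/append), then build the result by taking the head of each list.
import Mathlib
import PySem

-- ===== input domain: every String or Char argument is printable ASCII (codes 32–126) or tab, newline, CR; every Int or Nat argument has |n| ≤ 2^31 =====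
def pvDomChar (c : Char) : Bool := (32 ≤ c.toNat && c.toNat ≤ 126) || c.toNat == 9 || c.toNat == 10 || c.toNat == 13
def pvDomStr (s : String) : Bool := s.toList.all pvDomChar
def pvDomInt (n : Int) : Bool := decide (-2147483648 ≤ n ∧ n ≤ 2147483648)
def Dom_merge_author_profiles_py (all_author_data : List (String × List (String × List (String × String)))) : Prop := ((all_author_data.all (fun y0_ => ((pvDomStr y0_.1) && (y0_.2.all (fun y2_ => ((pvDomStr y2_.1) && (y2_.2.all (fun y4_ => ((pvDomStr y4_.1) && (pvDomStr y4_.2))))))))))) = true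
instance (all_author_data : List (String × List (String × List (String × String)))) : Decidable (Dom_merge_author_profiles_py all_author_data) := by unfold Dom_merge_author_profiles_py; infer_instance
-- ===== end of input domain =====

-- B replaces A's streaming first-non-empty-wins conditional update with a gather-then-select
-- decomposition (group all truthy values per key, then take each list's head); same cost.

-- ===== PORT A =====
-- literal port of A: one merged dict, conditional update 'value and (key not in merged or not merged[key])'
def merge_author_profiles_py (all_author_data : List (String × List (String × List (String × String)))) : List (String × String) :=
  (all_author_data.foldl
    (fun (merged : PySem.Dict String String) sd =>
      let author := (PySem.Dict.mk sd.2).getD "author" []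
      author.foldl
        (fun m kv =>
          if kv.2 ≠ "" ∧ (m.contains kv.1 = false ∨ m.getD kv.1 "" = "") then
            m.insert kv.1 kv.2
          else m)
        merged)
    PySem.Dict.empty).items

-- ===== PORT B =====
-- port of Source B: phase 1 groups every truthy value per key (setdefault/append = modify with ++[v]),
-- phase 2 maps each key to the head of its value list
def merge_author_profiles_py_alt (all_author_data : List (String × List (String × List (String × String)))) : List (String × String) :=
  let index := all_author_data.foldl
    (fun (idx : PySem.Dict String (List String)) sd =>
      ((PySem.Dict.mk sd.2).getD "author" []).foldl
        (fun idx kv => if kv.2 ≠ "" then idx.modify kv.1 [] (· ++ [kv.2]) else idx)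
        idx)
    PySem.Dict.empty
  index.items.map (fun p => (p.1, p.2.headD ""))

-- ===== PRECONDITION & SPEC =====
def Spec_merge_author_profiles_py (all_author_data : List (String × List (String × List (String × String)))) (out : List (String × String)) : Prop := out = merge_author_profiles_py_alt all_author_data
instance (all_author_data : List (String × List (String × List (String × String)))) (out : List (String × String)) : Decidable (Spec_merge_author_profiles_py all_author_data out) := by unfold Spec_merge_author_profiles_py; infer_instance

-- ===== CLAIM (what is proved, stated in full; the proofs are below) =====
def Claim_equal_merge_author_profiles_py : Prop := ∀ (all_author_data : List (String × List (String × List (String × String)))), Dom_merge_author_profiles_py all_author_data → Spec_merge_author_profiles_py all_author_data (merge_author_profiles_py all_author_data)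

-- ===== LEMMAS AND PROOFS =====

-- the per-entry loop bodies of the two ports
def pvStepA (m : PySem.Dict String String) (kv : String × String) : PySem.Dict String String :=
  if kv.2 ≠ "" ∧ (m.contains kv.1 = false ∨ m.getD kv.1 "" = "") then m.insert kv.1 kv.2 else m

def pvStepB (idx : PySem.Dict String (List String)) (kv : String × String) : PySem.Dict String (List String) :=
  if kv.2 ≠ "" then idx.modify kv.1 [] (· ++ [kv.2]) else idx

-- projection from B's grouped index to A's merged dict
def pvProj (p : String × List String) : String × String := (p.1, p.2.headD "")

-- invariant of B's index: unique keys, and every stored list starts with a non-empty value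
def pvInv (idx : PySem.Dict String (List String)) : Prop :=
  idx.keys.Nodup ∧ ∀ p ∈ idx.items, p.2.headD "" ≠ ""

lemma pvContains_proj (l : List (String × List String)) (k : String) :
    (PySem.Dict.mk (l.map pvProj)).contains k = (PySem.Dict.mk l).contains k := by
  simp only [PySem.Dict.contains, List.any_map]
  congr 1

lemma pvGet?_proj (l : List (String × List String)) (k : String) :
    (PySem.Dict.mk (l.map pvProj)).get? k = ((PySem.Dict.mk l).get? k).map (fun vs => vs.headD "") := by
  induction l with
  | nil => rfl
  | cons p t ih =>
    by_cases h : (p.1 == k) = true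
    · simp [PySem.Dict.get?, pvProj, h]
    · have e1 : (PySem.Dict.mk ((p :: t).map pvProj)).get? k = (PySem.Dict.mk (t.map pvProj)).get? k := by
        simp [PySem.Dict.get?, pvProj, h]
      have e2 : (PySem.Dict.mk (p :: t)).get? k = (PySem.Dict.mk t).get? k := by
        simp [PySem.Dict.get?, h]
      rw [e1, e2, ih]

lemma pvHeadD_append {α : Type} (vs l : List α) (d : α) (h : vs ≠ []) :
    (vs ++ l).headD d = vs.headD d := by
  cases vs with
  | nil => exact absurd rfl h
  | cons a t => rfl

lemma pvStep (idx : PySem.Dict String (List String)) (kv : String × String) (h : pvInv idx) :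
    pvStepA (PySem.Dict.mk (idx.items.map pvProj)) kv = PySem.Dict.mk ((pvStepB idx kv).items.map pvProj)
      ∧ pvInv (pvStepB idx kv) := by
  obtain ⟨hnd, hval⟩ := h
  by_cases hv : kv.2 = ""
  · have hb : pvStepB idx kv = idx := by simp [pvStepB, hv]
    constructor
    · simp [pvStepA, hv, hb]
    · rw [hb]; exact ⟨hnd, hval⟩
  · by_cases hc : idx.contains kv.1 = true
    · -- key already has a truthy value: A skips, B appends to the list (head unchanged)
      obtain ⟨vs, hvs⟩ : ∃ vs, idx.get? kv.1 = some vs := by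
        have hf : (List.find? (fun p => p.1 == kv.1) idx.items).isSome := by
          rw [List.find?_isSome]
          simpa only [PySem.Dict.contains, List.any_eq_true] using hc
        obtain ⟨q, hq⟩ := Option.isSome_iff_exists.mp hf
        exact ⟨q.2, by simp [PySem.Dict.get?, hq]⟩
      have hmem : (kv.1, vs) ∈ idx.items := PySem.Dict.mem_items_of_get?_eq_some _ hvs
      have hhead : vs.headD "" ≠ "" := hval _ hmem
      have hvs_ne : vs ≠ [] := by rintro rfl; simp at hhead
      have hgD : idx.getD kv.1 [] = vs := PySem.Dict.getD_of_get?_eq_some _ _ hvs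
      have hA : pvStepA (PySem.Dict.mk (idx.items.map pvProj)) kv
          = PySem.Dict.mk (idx.items.map pvProj) := by
        have h1 : (PySem.Dict.mk (idx.items.map pvProj)).contains kv.1 = true :=
          (pvContains_proj idx.items kv.1).trans hc
        have h2 : (PySem.Dict.mk (idx.items.map pvProj)).getD kv.1 "" = vs.headD "" := by
          simp only [PySem.Dict.getD, pvGet?_proj, hvs, Option.map_some, Option.getD_some]
        have hcond : ¬(kv.2 ≠ "" ∧ ((PySem.Dict.mk (idx.items.map pvProj)).contains kv.1 = false ∨ (PySem.Dict.mk (idx.items.map pvProj)).getD kv.1 "" = "")) := by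
          rintro ⟨-, h | h⟩
          · rw [h1] at h; cases h
          · rw [h2] at h; exact hhead h
        simp only [pvStepA, if_neg hcond]
      have hBitems : (pvStepB idx kv).items
          = idx.items.map (fun p => if (p.1 == kv.1) = true then (kv.1, vs ++ [kv.2]) else p) := by
        simp only [pvStepB, if_pos hv, PySem.Dict.modify, hgD]
        rw [PySem.Dict.items_insert_of_contains _ _ hc]
      refine ⟨?_, ?_, ?_⟩
      · rw [hA, hBitems]
        congr 1
        rw [List.map_map, List.map_congr_left]
        intro p hp
        by_cases hk : (p.1 == kv.1) = true
        · have hkeq : p.1 = kv.1 := by simpa using hk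
          have : p = (kv.1, vs) := by
            -- nodup keys: the unique item with key kv.1 is (kv.1, vs)
            have h1 : idx.get? p.1 = some p.2 := PySem.Dict.get?_of_mem_items _ hp hnd
            rw [hkeq, hvs] at h1
            obtain rfl : vs = p.2 := by injection h1
            exact Prod.ext hkeq rfl
          subst this
          show pvProj (kv.1, vs) = pvProj (if ((kv.1, vs).1 == kv.1) = true then (kv.1, vs ++ [kv.2]) else (kv.1, vs))
          rw [if_pos hk]
          show (kv.1, vs.headD "") = (kv.1, (vs ++ [kv.2]).headD "")
          rw [pvHeadD_append _ _ _ hvs_ne]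
        · show pvProj p = pvProj (if (p.1 == kv.1) = true then (kv.1, vs ++ [kv.2]) else p)
          rw [if_neg (by simpa using hk)]
      · -- keys unchanged
        have : (pvStepB idx kv).keys = idx.keys := by
          simp only [PySem.Dict.keys, hBitems, List.map_map]
          apply List.map_congr_left
          intro p _
          by_cases hk : (p.1 == kv.1) = true
          · show (if (p.1 == kv.1) = true then (kv.1, vs ++ [kv.2]) else p).1 = p.1
            rw [if_pos hk]
            exact ((by simpa using hk : p.1 = kv.1)).symm
          · show (if (p.1 == kv.1) = true then (kv.1, vs ++ [kv.2]) else p).1 = p.1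
            rw [if_neg hk]
        rw [this]; exact hnd
      · intro p hp
        rw [hBitems] at hp
        rcases List.mem_map.mp hp with ⟨q, hq, rfl⟩
        by_cases hk : (q.1 == kv.1) = true
        · rw [if_pos hk]
          show (vs ++ [kv.2]).headD "" ≠ ""
          rw [pvHeadD_append _ _ _ hvs_ne]
          exact hhead
        · rw [if_neg (by simpa using hk)]
          exact hval _ hq
    · -- fresh key with truthy value: both ports append
      have hc' : idx.contains kv.1 = false := by simpa using hc
      have hgD : idx.getD kv.1 [] = [] := PySem.Dict.getD_of_not_contains _ _ hc'
      have hA : pvStepA (PySem.Dict.mk (idx.items.map pvProj)) kv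
          = PySem.Dict.mk (idx.items.map pvProj ++ [(kv.1, kv.2)]) := by
        have h1 : (PySem.Dict.mk (idx.items.map pvProj)).contains kv.1 = false :=
          (pvContains_proj idx.items kv.1).trans hc'
        simp only [pvStepA, if_pos (And.intro hv (Or.inl h1))]
        simp [PySem.Dict.insert, h1]
      have hBitems : (pvStepB idx kv).items = idx.items ++ [(kv.1, [kv.2])] := by
        simp only [pvStepB, if_pos hv, PySem.Dict.modify, hgD]
        rw [PySem.Dict.items_insert_of_not_contains _ _ hc']
        simp
      have hknotmem : kv.1 ∉ idx.keys := by
        intro hmem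
        rw [← PySem.Dict.contains_iff_mem_keys] at hmem
        simp [hc'] at hmem
      refine ⟨?_, ?_, ?_⟩
      · rw [hA, hBitems]; simp [pvProj]
      · have : (pvStepB idx kv).keys = idx.keys ++ [kv.1] := by
          rw [PySem.Dict.keys, hBitems]; simp [PySem.Dict.keys]
        rw [this]
        rw [List.nodup_append]
        refine ⟨hnd, List.nodup_singleton _, ?_⟩
        intro a ha b hb
        simp only [List.mem_singleton] at hb
        subst hb
        exact fun h => hknotmem (h ▸ ha)
      · intro p hp
        rw [hBitems] at hp
        rcases List.mem_append.mp hp with h | h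
        · exact hval _ h
        · simp at h; subst h; simpa using hv

lemma pvInner (l : List (String × String)) (idx : PySem.Dict String (List String))
    (h : pvInv idx) :
    l.foldl pvStepA (PySem.Dict.mk (idx.items.map pvProj))
      = PySem.Dict.mk ((l.foldl pvStepB idx).items.map pvProj)
      ∧ pvInv (l.foldl pvStepB idx) := by
  induction l generalizing idx with
  | nil => exact ⟨rfl, h⟩
  | cons kv rest ih =>
    obtain ⟨hstep, hinv⟩ := pvStep idx kv h
    simp only [List.foldl_cons, hstep]
    exact ih _ hinv

lemma pvOuter (all : List (String × List (String × List (String × String))))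
    (idx : PySem.Dict String (List String)) (h : pvInv idx) :
    (all.foldl (fun m sd => ((PySem.Dict.mk sd.2).getD "author" []).foldl pvStepA m)
        (PySem.Dict.mk (idx.items.map pvProj)))
      = PySem.Dict.mk
          ((all.foldl (fun i sd => ((PySem.Dict.mk sd.2).getD "author" []).foldl pvStepB i) idx).items.map pvProj)
      ∧ pvInv (all.foldl (fun i sd => ((PySem.Dict.mk sd.2).getD "author" []).foldl pvStepB i) idx) := by
  induction all generalizing idx with
  | nil => exact ⟨rfl, h⟩
  | cons sd rest ih =>
    obtain ⟨hstep, hinv⟩ := pvInner ((PySem.Dict.mk sd.2).getD "author" []) idx h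
    simp only [List.foldl_cons, hstep]
    exact ih _ hinv

-- ===== VERDICT (by name: the statement is the Claim_ definition above) =====
theorem merge_author_profiles_py_spec : Claim_equal_merge_author_profiles_py := by
  intro all _
  unfold Spec_merge_author_profiles_py merge_author_profiles_py merge_author_profiles_py_alt
  have h0 : pvInv PySem.Dict.empty := by
    constructor
    · simp [PySem.Dict.empty, PySem.Dict.keys]
    · intro p hp; simp [PySem.Dict.empty] at hp
  have := (pvOuter all PySem.Dict.empty h0).1
  simp only [PySem.Dict.empty, List.map_nil] at this
  show (all.foldl (fun m sd => ((PySem.Dict.mk sd.2).getD "author" []).foldl pvStepA m)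
      (PySem.Dict.mk [])).items = _
  rw [this]
  rfl
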